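-- pv_equiv track=rewrite | github.com/shiraily/exercise | atcoder/254.py | k_swap2
-- ===== SOURCE A (Python) =====
-- def k_swap2(arr, k):
--     arrs = []
--     n = len(arr)
--     for i in range(k):
--         arrs.append([arr[j * k + i] for j in range((n - i - 1) // k + 1)])
--         arrs[i].sort()
--     sorted_arr = sorted(arr)
--     for i in range(n):
--         tgt = arrs[i % k][i // k]
--         if tgt != sorted_arr[i]:
--             return "No"
--     return "Yes"
-- ===== SOURCE B (Python) =====
-- def k_swap2(arr, k):
--     # k-distance swaps permute only within each residue class mod k, so arr is
--     # sortable iff, per residue class, arr and sorted(arr) hold the same multiset.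
--     # Check that with one +1/-1 difference counter instead of sorting each group.
--     s = sorted(arr)
--     counts = {}
--     for i, (a, b) in enumerate(zip(arr, s)):
--         r = i % k
--         counts[r, a] = counts.get((r, a), 0) + 1
--         counts[r, b] = counts.get((r, b), 0) - 1
--     return "No" if any(counts.values()) else "Yes"
-- ===== Notes on version B (the rewrite author's own statement) =====
-- stated objective: alternative
-- what changed: B never builds or sorts the residue groups: it makes one pass over enumerate(zip(arr, sorted(arr))) maintaining a single +1/-1 hash difference-counter keyed by (i % k, value), and answers Yes iff every counter is zero, i.e. iff each residue class carries the same multiset in arr and in sorted(arr); A instead materialises the k strided groups, sorts each, and compares element by element against the sorted array.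
import Mathlib
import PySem

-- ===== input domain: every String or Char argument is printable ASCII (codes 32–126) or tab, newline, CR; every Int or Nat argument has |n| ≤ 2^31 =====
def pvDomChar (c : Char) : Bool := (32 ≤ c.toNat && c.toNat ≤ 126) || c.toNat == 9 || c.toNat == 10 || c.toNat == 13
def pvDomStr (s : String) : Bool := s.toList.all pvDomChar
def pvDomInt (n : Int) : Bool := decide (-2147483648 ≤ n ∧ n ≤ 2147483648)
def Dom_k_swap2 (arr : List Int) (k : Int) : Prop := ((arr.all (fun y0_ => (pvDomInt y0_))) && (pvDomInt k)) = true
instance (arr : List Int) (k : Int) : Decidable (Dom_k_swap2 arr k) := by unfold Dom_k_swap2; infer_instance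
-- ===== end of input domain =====

-- B drops A's group building and per-group sorting in favour of one pass with a +1/-1
-- hash difference-counter keyed by (i % k, value) (objective: alternative).

-- ===== PORT A =====
def k_swap2 (arr : List Int) (k : Int) : String :=
  let n : Int := (arr.length : Int)
  -- for i in range(k): arrs.append([arr[j*k+i] for j in range((n-i-1)//k+1)]); arrs[i].sort()
  let arrs : List (List Int) :=
    (PySem.List.pyRange 0 k 1).foldl
      (fun acc i => acc ++ [PySem.List.sorted
        ((PySem.List.pyRange 0 (PySem.Int.floordiv (n - i - 1) k + 1) 1).map
          (fun j => PySem.List.pyGetD arr (j * k + i) 0)) (fun x => x) false]) []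
  let sorted_arr := PySem.List.sorted arr (fun x => x) false
  -- for i in range(n): if arrs[i % k][i // k] != sorted_arr[i]: return "No"  /  return "Yes"
  -- (all indices are in range when 1 ≤ k; Pre_ excludes the raising inputs, so pyGetD's default is never read)
  if (PySem.List.pyRange 0 n 1).all (fun i =>
      PySem.List.pyGetD (PySem.List.pyGetD arrs (PySem.Int.mod i k) [])
        (PySem.Int.floordiv i k) 0 == PySem.List.pyGetD sorted_arr i 0)
  then "Yes" else "No"

-- ===== PORT B =====
def k_swap2_alt (arr : List Int) (k : Int) : String :=
  let s := PySem.List.sorted arr (fun x => x) false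
  -- for i, (a, b) in enumerate(zip(arr, s)): r = i % k;
  --   counts[r, a] = counts.get((r, a), 0) + 1; counts[r, b] = counts.get((r, b), 0) - 1
  -- (d[key] = d.get(key, 0) + delta is exactly Dict.modify key 0 (· + delta))
  let counts : PySem.Dict (Int × Int) Int :=
    (PySem.List.enumerate (arr.zip s)).foldl
      (fun d p =>
        (d.modify (PySem.Int.mod p.1 k, p.2.1) 0 (· + 1)).modify
          (PySem.Int.mod p.1 k, p.2.2) 0 (· - 1))
      PySem.Dict.empty
  -- return "No" if any(counts.values()) else "Yes"   (an int is truthy iff nonzero)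
  if counts.values.any (fun v => v != 0) then "No" else "Yes"

-- ===== PRECONDITION & SPEC =====
-- Pre_ excludes exactly the inputs where Python A raises: for k ≤ 0 and arr ≠ [] A raises
-- (ZeroDivisionError on i % 0 for k = 0, where B raises too, and IndexError on
-- arrs[i % k] for k < 0, where B computes the mod-|k| answer instead).
def Pre_k_swap2 (arr : List Int) (k : Int) : Prop := 1 ≤ k ∨ arr = []
instance (arr : List Int) (k : Int) : Decidable (Pre_k_swap2 arr k) := by unfold Pre_k_swap2; infer_instance
def pvWitness_k_swap2 : List Int × Int := ([3, 1, 2], 2)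
def Spec_k_swap2 (arr : List Int) (k : Int) (out : String) : Prop := out = k_swap2_alt arr k
instance (arr : List Int) (k : Int) (out : String) : Decidable (Spec_k_swap2 arr k out) := by unfold Spec_k_swap2; infer_instance

-- ===== CLAIM (what is proved, stated in full; the proofs are below) =====
def Claim_equal_k_swap2 : Prop := ∀ (arr : List Int) (k : Int), Dom_k_swap2 arr k → Pre_k_swap2 arr k → Spec_k_swap2 arr k (k_swap2 arr k)

-- ===== LEMMAS AND PROOFS =====

-- number of indices j with j*K + r < N, exactly as A computes it: (N - r - 1) // k + 1
def cntk (N : Nat) (K : Nat) (r : Nat) : Nat :=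
  (PySem.Int.floordiv ((N : Int) - (r : Int) - 1) (K : Int) + 1).toNat

-- A's strided group and its target slice of the sorted array, in the form A computes them
def strG (arr : List Int) (K r : Nat) : List Int :=
  (List.range (cntk arr.length K r)).map (fun q => arr.getD (q * K + r) 0)
def strT (arr s : List Int) (K r : Nat) : List Int :=
  (List.range (cntk arr.length K r)).map (fun q => s.getD (q * K + r) 0)

lemma cnt_iff (N K q r : Nat) (hK : 0 < K) : q < cntk N K r ↔ q * K + r < N := by
  unfold cntk
  rw [Int.lt_toNat, Int.lt_add_one_iff, PySem.Int.le_floordiv_iff_mul_le (by exact_mod_cast hK)]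
  omega

-- the indices of residue r below N, listed increasingly, are r, K+r, …, (cntk-1)*K+r
lemma idx_eq (N K r : Nat) (hK : 0 < K) (hr : r < K) :
    (List.range N).filter (fun i => decide (i % K = r))
      = (List.range (cntk N K r)).map (fun q => q * K + r) := by
  have hmem : ∀ i, i ∈ (List.range N).filter (fun i => decide (i % K = r)) ↔
      i ∈ (List.range (cntk N K r)).map (fun q => q * K + r) := by
    intro i
    simp only [List.mem_filter, List.mem_range, List.mem_map, decide_eq_true_eq]
    constructor
    · rintro ⟨hiN, hir⟩
      have h1 := Nat.div_add_mod i K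
      have h2 : i / K * K = K * (i / K) := Nat.mul_comm _ _
      refine ⟨i / K, ?_, by omega⟩
      rw [cnt_iff _ _ _ _ hK]; omega
    · rintro ⟨q, hq, rfl⟩
      rw [cnt_iff _ _ _ _ hK] at hq
      exact ⟨hq, by rw [Nat.add_comm, Nat.add_mul_mod_self_right, Nat.mod_eq_of_lt hr]⟩
  have hp1 : ((List.range N).filter (fun i => decide (i % K = r))).Pairwise (· < ·) :=
    List.Pairwise.filter _ (List.pairwise_lt_range)
  have hp2 : ((List.range (cntk N K r)).map (fun q => q * K + r)).Pairwise (· < ·) := by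
    rw [List.pairwise_map]
    exact List.pairwise_lt_range.imp (fun h => by
      exact Nat.add_lt_add_right ((Nat.mul_lt_mul_right hK).mpr h) r)
  exact List.Perm.eq_of_pairwise
    (fun a b _ _ h1 h2 => absurd h1 (Nat.lt_asymm h2)) hp1 hp2
    (List.perm_of_nodup_nodup_toFinset_eq hp1.nodup hp2.nodup
      (by ext x; simp only [List.mem_toFinset]; exact hmem x))

-- A's arrs is the list of sorted strided groups
lemma arrs_eq (arr : List Int) (K : Nat) :
    (PySem.List.pyRange 0 (K : Int) 1).foldl
      (fun acc i => acc ++ [PySem.List.sorted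
        ((PySem.List.pyRange 0 (PySem.Int.floordiv ((arr.length : Int) - i - 1) (K : Int) + 1) 1).map
          (fun j => PySem.List.pyGetD arr (j * (K : Int) + i) 0)) (fun x => x) false]) []
    = (List.range K).map (fun r => PySem.List.sorted (strG arr K r) (fun x => x) false) := by
  rw [PySem.List.foldl_append_singleton_eq_map]
  rw [PySem.List.pyRange_one 0 (K : Int)]
  simp only [List.nil_append, List.map_map, Int.sub_zero, Int.toNat_natCast, zero_add]
  apply List.map_congr_left
  intro r hr
  simp only [Function.comp]
  congr 1
  unfold strG
  rw [PySem.List.pyRange_one]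
  simp only [Int.sub_zero, zero_add]
  rw [show (PySem.Int.floordiv ((arr.length : Int) - (r : Int) - 1) (K : Int) + 1).toNat
      = cntk arr.length K r from rfl]
  rw [List.map_map]
  apply List.map_congr_left
  intro q hq
  simp only [Function.comp]
  rw [show ((q : Int) * (K : Int) + (r : Int)) = ((q * K + r : Nat) : Int) by push_cast; ring]
  rw [PySem.List.pyGetD_natCast]

-- A's flat per-position check and the per-residue whole-list statement say the same thing
lemma check_iff (arr s : List Int) (K : Nat) (hK : 0 < K) :
    (∀ i < arr.length,
        (PySem.List.sorted (strG arr K (i % K)) (fun x => x) false).getD (i / K) 0 = s.getD i 0)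
    ↔ (∀ r < K, PySem.List.sorted (strG arr K r) (fun x => x) false = strT arr s K r) := by
  constructor
  · intro h r hr
    have hlen : (PySem.List.sorted (strG arr K r) (fun x => x) false).length = cntk arr.length K r := by
      rw [PySem.List.length_sorted]; unfold strG; rw [List.length_map, List.length_range]
    apply List.ext_getElem (by unfold strT; simp [hlen])
    intro q h1 h2
    have hq : q < cntk arr.length K r := by rwa [hlen] at h1
    have hiN : q * K + r < arr.length := (cnt_iff _ _ _ _ hK).mp hq
    have hmod : (q * K + r) % K = r := by
      rw [Nat.add_comm, Nat.add_mul_mod_self_right, Nat.mod_eq_of_lt hr]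
    have hdiv : (q * K + r) / K = q := by
      rw [Nat.add_comm, Nat.add_mul_div_right _ _ hK, Nat.div_eq_of_lt hr, Nat.zero_add]
    have := h (q * K + r) hiN
    rw [hmod, hdiv] at this
    unfold strT
    rw [List.getElem_map, List.getElem_range]
    rw [← List.getD_eq_getElem _ 0 h1, this]
  · intro h i hi
    have hr : i % K < K := Nat.mod_lt _ hK
    have hq : i / K < cntk arr.length K (i % K) := by
      rw [cnt_iff _ _ _ _ hK]
      have := Nat.div_add_mod i K
      have h2 : i / K * K = K * (i / K) := Nat.mul_comm _ _
      omega
    have hid : i / K * K + i % K = i := by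
      have := Nat.div_add_mod i K
      have h2 : i / K * K = K * (i / K) := Nat.mul_comm _ _
      omega
    rw [h (i % K) hr]
    unfold strT
    rw [List.getD_eq_getElem _ 0 (by simp [hq]), List.getElem_map, List.getElem_range, hid]

-- B-side: the difference counter after the fold, at any key
lemma getD_pm {β : Type} (k1 k2 : β → Int × Int) (l : List β) (d : PySem.Dict (Int × Int) Int)
    (q : Int × Int) :
    (l.foldl (fun d p => (d.modify (k1 p) 0 (· + 1)).modify (k2 p) 0 (· - 1)) d).getD q 0
      = d.getD q 0 + (l.countP (fun p => decide (k1 p = q)) : Int)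
          - (l.countP (fun p => decide (k2 p = q)) : Int) := by
  induction l generalizing d with
  | nil => simp
  | cons x t ih =>
    simp only [List.foldl_cons, ih, List.countP_cons, PySem.Dict.getD_modify]
    by_cases h1 : q = k1 x
    · subst h1
      by_cases h2 : k1 x = k2 x
      · simp only [h2, decide_true, if_true]
        push_cast
        omega
      · have h2' : ¬ k2 x = k1 x := fun h => h2 h.symm
        simp [h2, h2']
        omega
    · by_cases h2 : q = k2 x
      · subst h2
        have h1' : ¬ k1 x = k2 x := fun h => h1 h.symm
        simp [h1, h1']
        omega
      · have h1' : ¬ k1 x = q := fun h => h1 h.symm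
        have h2' : ¬ k2 x = q := fun h => h2 h.symm
        simp [h1, h2, h1', h2']

-- B-side: the fold keeps the key list duplicate-free
lemma nodup_pm {β : Type} (k1 k2 : β → Int × Int) (l : List β) (d : PySem.Dict (Int × Int) Int)
    (h : d.keys.Nodup) :
    (l.foldl (fun d p => (d.modify (k1 p) 0 (· + 1)).modify (k2 p) 0 (· - 1)) d).keys.Nodup := by
  induction l generalizing d with
  | nil => exact h
  | cons x t ih =>
    refine ih _ ?_
    rw [PySem.Dict.keys_modify]
    refine PySem.Dict.nodup_keys_insert _ _ _ ?_
    rw [PySem.Dict.keys_modify]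
    exact PySem.Dict.nodup_keys_insert _ _ _ h

-- "any(counts.values())" is false iff the counter is zero at every key
lemma allzero_iff (d : PySem.Dict (Int × Int) Int) (h : d.keys.Nodup) :
    (d.values.any (fun v => v != 0) = false) ↔ ∀ q, d.getD q 0 = 0 := by
  rw [List.any_eq_false]
  simp only [bne_iff_ne, ne_eq, not_not]
  rw [PySem.Dict.values_eq_map_keys d h 0]
  constructor
  · intro hall q
    by_cases hq : q ∈ d.keys
    · exact hall _ (List.mem_map_of_mem hq)
    · refine PySem.Dict.getD_of_not_contains d 0 ?_
      rw [← Bool.not_eq_true, PySem.Dict.contains_iff_mem_keys]; exact hq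
  · rintro hz v hv
    obtain ⟨q, _, rfl⟩ := List.mem_map.mp hv
    exact hz q

-- count of v in the residue-r strided slice of xs, as a flat countP over all positions
lemma count_strided (xs : List Int) (n K r : Nat) (hK : 0 < K) (hr : r < K) (v : Int) :
    ((List.range n).countP (fun i => decide ((((i % K : Nat) : Int), xs.getD i 0) = (((r : Nat) : Int), v))))
      = ((List.range (cntk n K r)).map (fun q => xs.getD (q * K + r) 0)).count v := by
  have hmap : (List.range (cntk n K r)).map (fun q => xs.getD (q * K + r) 0)
      = ((List.range n).filter (fun i => decide (i % K = r))).map (fun i => xs.getD i 0) := by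
    rw [idx_eq n K r hK hr, List.map_map]; rfl
  rw [List.count_eq_countP, hmap, List.countP_map, List.countP_filter]
  apply List.countP_congr
  intro i _
  simp only [Function.comp, Prod.mk.injEq, decide_eq_true_eq, Bool.and_eq_true,
    Nat.cast_inj, beq_iff_eq]
  constructor
  · rintro ⟨h1, h2⟩; exact ⟨h2, h1⟩
  · rintro ⟨h2, h1⟩; exact ⟨h1, h2⟩

-- T_r is already sorted (it reads the sorted array at increasing indices)
lemma strT_pairwise (arr : List Int) (K r : Nat) (hK : 0 < K) :
    (strT arr (PySem.List.sorted arr (fun x => x) false) K r).Pairwise (· ≤ ·) := by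
  unfold strT
  rw [List.pairwise_iff_getElem]
  intro p q hp hq hpq
  simp only [List.length_map, List.length_range] at hp hq
  simp only [List.getElem_map, List.getElem_range]
  have hlt : q * K + r < arr.length := (cnt_iff _ _ _ _ hK).mp hq
  have hlen : (PySem.List.sorted arr (fun x => x) false).length = arr.length :=
    PySem.List.length_sorted arr _ false
  have hle : p * K + r ≤ q * K + r := by
    have := Nat.mul_le_mul_right K (Nat.le_of_lt hpq); omega
  rw [List.getD_eq_getElem _ 0 (by omega), List.getD_eq_getElem _ 0 (by omega)]
  exact PySem.List.sorted_id_getElem_mono arr hle (by omega)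

-- difference counter identically zero ⟺ every sorted group equals its target slice
lemma counter_iff_groups (arr : List Int) (K : Nat) (hK : 0 < K) :
    (∀ q : Int × Int,
        ((List.range arr.length).countP (fun i => decide ((((i % K : Nat) : Int), arr.getD i 0) = q)) : Int)
          - ((List.range arr.length).countP (fun i => decide ((((i % K : Nat) : Int), (PySem.List.sorted arr (fun x => x) false).getD i 0) = q)) : Int) = 0)
    ↔ (∀ r < K, PySem.List.sorted (strG arr K r) (fun x => x) false
          = strT arr (PySem.List.sorted arr (fun x => x) false) K r) := by
  set s := PySem.List.sorted arr (fun x => x) false with hs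
  have hcnt : (∀ q : Int × Int,
        ((List.range arr.length).countP (fun i => decide ((((i % K : Nat) : Int), arr.getD i 0) = q)) : Int)
          - ((List.range arr.length).countP (fun i => decide ((((i % K : Nat) : Int), s.getD i 0) = q)) : Int) = 0)
      ↔ ∀ r < K, ∀ v : Int, (strG arr K r).count v = (strT arr s K r).count v := by
    constructor
    · intro h r hr v
      have := h (((r : Nat) : Int), v)
      rw [count_strided arr _ K r hK hr v, count_strided s _ K r hK hr v] at this
      unfold strG strT
      omega
    · rintro h ⟨r0, v⟩
      by_cases hr0 : ∃ r : Nat, r < K ∧ r0 = ((r : Nat) : Int)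
      · obtain ⟨r, hr, rfl⟩ := hr0
        rw [count_strided arr _ K r hK hr v, count_strided s _ K r hK hr v]
        have := h r hr v
        unfold strG strT at this
        omega
      · have hz : ∀ xs : List Int,
            (List.range arr.length).countP (fun i => decide ((((i % K : Nat) : Int), xs.getD i 0) = (r0, v))) = 0 := by
          intro xs
          rw [List.countP_eq_zero]
          intro i _
          simp only [Prod.mk.injEq, decide_eq_true_eq, not_and]
          intro hc
          exact absurd ⟨i % K, Nat.mod_lt _ hK, hc.symm⟩ hr0
        rw [hz arr, hz s]; norm_num
  rw [hcnt]
  apply forall_congr'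
  intro r
  apply imp_congr_right
  intro hr
  rw [← List.perm_iff_count, ← PySem.List.sorted_id_eq_sorted_id_iff_perm,
    PySem.List.sorted_eq_self_of_pairwise (strT arr s K r) (fun x => x) (strT_pairwise arr K r hK)]

-- B's counter fold, rewritten as a fold over the position range
lemma counts_eq (arr : List Int) (K : Nat) :
    (PySem.List.enumerate (arr.zip (PySem.List.sorted arr (fun x => x) false))).foldl
      (fun d p =>
        (d.modify (PySem.Int.mod p.1 (K : Int), p.2.1) 0 (· + 1)).modify
          (PySem.Int.mod p.1 (K : Int), p.2.2) 0 (· - 1))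
      (PySem.Dict.empty : PySem.Dict (Int × Int) Int)
    = (List.range arr.length).foldl
        (fun d i =>
          (d.modify (((i % K : Nat) : Int), arr.getD i 0) 0 (· + 1)).modify
            (((i % K : Nat) : Int), (PySem.List.sorted arr (fun x => x) false).getD i 0) 0 (· - 1))
        (PySem.Dict.empty : PySem.Dict (Int × Int) Int) := by
  set s := PySem.List.sorted arr (fun x => x) false with hs
  have hslen : s.length = arr.length := PySem.List.length_sorted arr _ false
  have hzlen : (arr.zip s).length = arr.length := by rw [List.length_zip, hslen]; omega
  rw [PySem.List.enumerate_eq_map_pyRange (arr.zip s) (0, 0)]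
  rw [show PySem.List.len (arr.zip s) = ((arr.length : Int)) by
    simp [PySem.List.len, hzlen]]
  rw [PySem.List.pyRange_one]
  simp only [Int.sub_zero, Int.toNat_natCast, zero_add, List.map_map, List.foldl_map]
  apply PySem.List.foldl_congr_mem
  intro d i hi
  have hin : i < arr.length := List.mem_range.mp hi
  simp only [Function.comp, PySem.Int.mod_natCast, PySem.List.pyGetD_natCast]
  rw [List.getD_eq_getElem _ (0, 0) (by omega), List.getElem_zip,
    ← List.getD_eq_getElem arr 0 (by omega), ← List.getD_eq_getElem s 0 (by omega)]

-- main equivalence for a positive k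
lemma main_eq (arr : List Int) (k : Int) (hk : 1 ≤ k) : k_swap2 arr k = k_swap2_alt arr k := by
  obtain ⟨K, hK0, rfl⟩ : ∃ K : Nat, 0 < K ∧ k = (K : Int) :=
    ⟨k.toNat, by omega, (Int.toNat_of_nonneg (by omega)).symm⟩
  simp only [k_swap2, k_swap2_alt]
  rw [arrs_eq arr K, counts_eq arr K]
  set s := PySem.List.sorted arr (fun x => x) false with hs
  -- the two if-conditions, as propositions
  have hA : ((PySem.List.pyRange 0 ((arr.length : Int)) 1).all (fun i =>
      PySem.List.pyGetD (PySem.List.pyGetD ((List.range K).map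
          (fun r => PySem.List.sorted (strG arr K r) (fun x => x) false)) (PySem.Int.mod i (K : Int)) [])
        (PySem.Int.floordiv i (K : Int)) 0 == PySem.List.pyGetD s i 0) = true)
      ↔ (∀ r < K, PySem.List.sorted (strG arr K r) (fun x => x) false = strT arr s K r) := by
    rw [List.all_eq_true, ← check_iff arr s K hK0]
    constructor
    · intro h i hi
      have hx := h (i : Int) (by rw [PySem.List.mem_pyRange_one]; constructor <;> [omega; exact_mod_cast hi])
      rw [beq_iff_eq, PySem.Int.mod_natCast, PySem.Int.floordiv_natCast,
        PySem.List.pyGetD_natCast, PySem.List.pyGetD_natCast, PySem.List.pyGetD_natCast] at hx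
      rwa [PySem.List.getD_map_range _ _ _ _ (Nat.mod_lt i hK0)] at hx
    · intro h x hx
      rw [PySem.List.mem_pyRange_one] at hx
      obtain ⟨i, rfl⟩ : ∃ i : Nat, x = (i : Int) := ⟨x.toNat, (Int.toNat_of_nonneg hx.1).symm⟩
      have hi : i < arr.length := by exact_mod_cast hx.2
      rw [beq_iff_eq, PySem.Int.mod_natCast, PySem.Int.floordiv_natCast,
        PySem.List.pyGetD_natCast, PySem.List.pyGetD_natCast, PySem.List.pyGetD_natCast]
      rw [PySem.List.getD_map_range _ _ _ _ (Nat.mod_lt i hK0)]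
      exact h i hi
  have hB : ((((List.range arr.length).foldl
        (fun d i =>
          (d.modify (((i % K : Nat) : Int), arr.getD i 0) 0 (· + 1)).modify
            (((i % K : Nat) : Int), s.getD i 0) 0 (· - 1))
        (PySem.Dict.empty : PySem.Dict (Int × Int) Int)).values.any (fun v => v != 0)) = false)
      ↔ (∀ r < K, PySem.List.sorted (strG arr K r) (fun x => x) false = strT arr s K r) := by
    have hnd : (((List.range arr.length).foldl
        (fun d i =>
          (d.modify (((i % K : Nat) : Int), arr.getD i 0) 0 (· + 1)).modify
            (((i % K : Nat) : Int), s.getD i 0) 0 (· - 1))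
        (PySem.Dict.empty : PySem.Dict (Int × Int) Int))).keys.Nodup :=
      nodup_pm _ _ _ _ PySem.Dict.nodup_keys_empty
    rw [allzero_iff _ hnd, ← counter_iff_groups arr K hK0]
    apply forall_congr'
    intro q
    have hgd : (((List.range arr.length).foldl
        (fun d i =>
          (d.modify (((i % K : Nat) : Int), arr.getD i 0) 0 (· + 1)).modify
            (((i % K : Nat) : Int), s.getD i 0) 0 (· - 1))
        (PySem.Dict.empty : PySem.Dict (Int × Int) Int))).getD q 0
        = (PySem.Dict.empty : PySem.Dict (Int × Int) Int).getD q 0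
            + ((List.range arr.length).countP (fun i => decide ((((i % K : Nat) : Int), arr.getD i 0) = q)) : Int)
            - ((List.range arr.length).countP (fun i => decide ((((i % K : Nat) : Int), s.getD i 0) = q)) : Int) :=
      getD_pm _ _ _ _ q
    rw [PySem.Dict.getD_empty] at hgd
    rw [hgd]
    simp only [← hs]
    omega
  by_cases hb : ((List.range arr.length).foldl
        (fun d i =>
          (d.modify (((i % K : Nat) : Int), arr.getD i 0) 0 (· + 1)).modify
            (((i % K : Nat) : Int), s.getD i 0) 0 (· - 1))
        (PySem.Dict.empty : PySem.Dict (Int × Int) Int)).values.any (fun v => v != 0) = true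
  · have hP : ¬ (∀ r < K, PySem.List.sorted (strG arr K r) (fun x => x) false = strT arr s K r) :=
      fun hp => by rw [hB.mpr hp] at hb; exact absurd hb (by simp)
    rw [if_neg (fun hc => hP (hA.mp hc)), if_pos hb]
  · simp only [Bool.not_eq_true] at hb
    rw [if_pos (hA.mpr (hB.mp hb)), if_neg (by rw [hb]; simp)]

-- ===== VERDICT (by name: the statement is the Claim_ definition above) =====
theorem k_swap2_spec : Claim_equal_k_swap2 := by
  intro arr k _ hpre
  unfold Spec_k_swap2
  rcases hpre with hk | rfl
  · exact main_eq arr k hk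
  · by_cases hk : 1 ≤ k
    · exact main_eq [] k hk
    · simp [k_swap2, k_swap2_alt, PySem.List.pyRange_one_eq_nil (by omega : k ≤ 0),
        PySem.List.sorted, PySem.Dict.empty]
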